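/- GENERATED by farm/mkstatement.py from design/units.tsv (unit `setup_temp_malloc`) and the Specs of Vorbis/Spec/*.lean — do not edit.
   THE STATEMENT of the proof unit `setup_temp_malloc`: the function `setup_temp_malloc` (66 instructions) satisfies its contract,
   given the contracts of its callees. What the names mean: Vorbis/Spec/Basic.lean. The theorem to prove:
   `theorem setup_temp_malloc_ok : Vorbis.Spec.setup_temp_malloc.Statement`. -/
import Vorbis.Spec.Alloc
import Vorbis.Spec.LibcMisc
import Vorbis.Spec.Runtime
namespace Vorbis.Spec.setup_temp_malloc
open X86 X86.User Asan

/-- The statement of unit `setup_temp_malloc`. -/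
def Statement : Prop :=
  ∀ (Lay : Layout) (_hLay : Lay.hi = 0x1000000) (μ : Microarch) (_hμ : UserX.MicroOK μ) (u₀ : State)
    (_hcode : HasCodeNat Lay u₀ Vorbis.L.setup_temp_malloc.entry Vorbis.Code.code_setup_temp_malloc.nat Vorbis.L.setup_temp_malloc.size)
    (_h_asan_load8_noabort : Asan.SmallCheck Lay μ Vorbis.WayInv (Vorbis.CodeOK u₀) [.rax, .rcx, .rdx] 8 Vorbis.L.__asan_load8_noabort.entry)
    (_h_asan_load4_noabort : Asan.SmallCheck Lay μ Vorbis.WayInv (Vorbis.CodeOK u₀) [.rax, .rcx, .rdx] 4 Vorbis.L.__asan_load4_noabort.entry)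
    (_h_arena_unpoison : Calls Lay μ Vorbis.WayInv (Vorbis.conv u₀) Vorbis.L.arena_unpoison.entry Asan.arenaUnpoisonSpec)
    (_h_malloc : ∀ (others : List Obj) (frames : List (Nat × FrameLayout)), Calls Lay μ Vorbis.WayInv (Vorbis.conv u₀) Vorbis.L.malloc.entry (Vorbis.Spec.malloc.spec others frames)),
    ∀ (others : List Obj) (frames : List (Nat × FrameLayout)) (A : Arena), Calls Lay μ Vorbis.WayInv (Vorbis.conv u₀) Vorbis.L.setup_temp_malloc.entry (Vorbis.Spec.setup_temp_malloc.spec others frames A)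

end Vorbis.Spec.setup_temp_malloc
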